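-- pv_equiv track=rewrite | github.com/Minuteandone/MSM-Aniviewer | aniviewer/Resources/bin2json/dof_anim_to_json olio.py | _extract_node_mappings
-- ===== SOURCE A (Python) =====
-- from typing import Any, Dict, Iterable, List, Optional, Tuple
--
-- def _extract_node_mappings(raw_text: str) -> List[str]:
--     mappings: List[str] = []
--     node_index = -1
--     for line in raw_text.splitlines():
--         stripped = line.lstrip()
--         if stripped.startswith("- NodeType:"):
--             node_index += 1
--             mappings.append("")
--             continue
--         if stripped.startswith("ImageIndexLocal2Global:"):
--             value = stripped.split(":", 1)[1].strip()
--             if node_index >= 0 and node_index < len(mappings):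
--                 mappings[node_index] = value
--     return mappings
-- ===== SOURCE B (Python) =====
-- def _extract_node_mappings(raw_text):
--     # group-first decomposition: split lines into per-NodeType blocks, then
--     # compute each block's value (last ImageIndexLocal2Global line wins)
--     blocks = []
--     for line in raw_text.splitlines():
--         if line.lstrip().startswith("- NodeType:"):
--             blocks.append([])
--         elif blocks:
--             blocks[-1].append(line)
--     result = []
--     for block in blocks:
--         value = ""
--         for line in block:
--             stripped = line.lstrip()
--             if stripped.startswith("ImageIndexLocal2Global:"):
--                 value = stripped.split(":", 1)[1].strip()
--         result.append(value)
--     return result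
-- ===== Notes on version B (the rewrite author's own statement) =====
-- stated objective: alternative
-- what changed: Replaces A's single pass with an index-threaded mutable list by a group-first decomposition: lines are first split into blocks at each node-marker line, then each block is mapped to the value of its last image-index line.
import Mathlib
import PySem

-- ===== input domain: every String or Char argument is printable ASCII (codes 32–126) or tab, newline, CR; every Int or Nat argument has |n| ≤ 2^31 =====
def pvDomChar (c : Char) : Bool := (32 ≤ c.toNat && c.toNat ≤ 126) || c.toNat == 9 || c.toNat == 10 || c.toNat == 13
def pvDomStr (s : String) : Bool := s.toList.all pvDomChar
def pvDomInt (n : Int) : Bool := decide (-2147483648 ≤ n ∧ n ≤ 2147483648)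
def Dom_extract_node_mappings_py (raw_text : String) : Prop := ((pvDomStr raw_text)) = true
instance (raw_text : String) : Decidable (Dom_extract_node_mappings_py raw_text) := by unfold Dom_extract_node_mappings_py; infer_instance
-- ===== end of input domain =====

-- B re-groups the lines into per-NodeType blocks before extracting each block's value
-- (a different decomposition of the same O(n) task; return values proved equal).

-- ===== PORT A =====

-- stripped.split(":", 1)[1].strip() — the [1] is totalised with getD "", unreachable
-- in both ports because the line is known to contain ':' (startswith guard).
def pvSplitVal (stripped : String) : String :=
  PySem.Str.strip ((PySem.List.pyGet? ((PySem.Str.splitMax? stripped ":" 1).getD []) 1).getD "")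

def pvALoop : List String → List String → Int → List String
  | [], mappings, _ => mappings
  | line :: rest, mappings, node_index =>
    let stripped := PySem.Str.lstrip line
    if PySem.Str.startswith stripped "- NodeType:" then
      pvALoop rest (mappings ++ [""]) (node_index + 1)
    else if PySem.Str.startswith stripped "ImageIndexLocal2Global:" then
      if 0 ≤ node_index ∧ node_index < (mappings.length : Int) then
        pvALoop rest (mappings.set node_index.toNat (pvSplitVal stripped)) node_index
      else
        pvALoop rest mappings node_index
    else
      pvALoop rest mappings node_index

def extract_node_mappings_py (raw_text : String) : List String :=
  pvALoop (PySem.Str.splitlines raw_text) [] (-1)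

-- ===== PORT B =====

-- the inner per-block loop: value = last ImageIndexLocal2Global value, default ""
def pvBlockStep (value : String) (line : String) : String :=
  let stripped := PySem.Str.lstrip line
  if PySem.Str.startswith stripped "ImageIndexLocal2Global:" then pvSplitVal stripped else value

def pvBlockValue (block : List String) : String := block.foldl pvBlockStep ""

-- phase 1 of B: group the lines into blocks ('elif blocks: blocks[-1].append(line)')
def pvBBlocks : List String → List (List String) → List (List String)
  | [], blocks => blocks
  | line :: rest, blocks =>
    if PySem.Str.startswith (PySem.Str.lstrip line) "- NodeType:" then
      pvBBlocks rest (blocks ++ [[]])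
    else
      match blocks.getLast? with
      | some last => pvBBlocks rest (blocks.dropLast ++ [last ++ [line]])
      | none => pvBBlocks rest blocks

def extract_node_mappings_py_alt (raw_text : String) : List String :=
  (pvBBlocks (PySem.Str.splitlines raw_text) []).map pvBlockValue

-- ===== PRECONDITION & SPEC =====
def Spec_extract_node_mappings_py (raw_text : String) (out : List String) : Prop := out = extract_node_mappings_py_alt raw_text
instance (raw_text : String) (out : List String) : Decidable (Spec_extract_node_mappings_py raw_text out) := by unfold Spec_extract_node_mappings_py; infer_instance

-- ===== CLAIM (what is proved, stated in full; the proofs are below) =====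
def Claim_equal_extract_node_mappings_py : Prop := ∀ (raw_text : String), Dom_extract_node_mappings_py raw_text → Spec_extract_node_mappings_py raw_text (extract_node_mappings_py raw_text)

-- ===== LEMMAS AND PROOFS =====

-- The main invariant: when A's state is (bs.map pvBlockValue, bs.length - 1) and
-- B's accumulated blocks are bs, the two loops produce map-related results.
lemma pvMain (lines : List String) : ∀ (bs : List (List String)),
    pvALoop lines (bs.map pvBlockValue) ((bs.length : Int) - 1)
      = (pvBBlocks lines bs).map pvBlockValue := by
  induction lines with
  | nil => intro bs; rfl
  | cons line rest ih =>
    intro bs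
    simp only [pvALoop, pvBBlocks]
    by_cases hN : PySem.Str.startswith (PySem.Str.lstrip line) "- NodeType:"
    · simp only [hN, if_true]
      have h1 : bs.map pvBlockValue ++ [""] = (bs ++ [[]]).map pvBlockValue := by
        simp [pvBlockValue]
      have h2 : ((bs.length : Int) - 1) + 1 = ((bs ++ [[]]).length : Int) - 1 := by
        simp
      rw [h1, h2]
      exact ih (bs ++ [[]])
    · simp only [hN]
      rcases bs.eq_nil_or_concat' with rfl | ⟨bs₀, b, rfl⟩
      · simp only [List.getLast?_nil]
        by_cases hI : PySem.Str.startswith (PySem.Str.lstrip line) "ImageIndexLocal2Global:"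
        · simpa [hI] using ih []
        · simpa [hI] using ih []
      · have hlast : (bs₀ ++ [b]).getLast? = some b := by simp
        have hdl : (bs₀ ++ [b]).dropLast = bs₀ := by simp
        rw [hlast, hdl]
        by_cases hI : PySem.Str.startswith (PySem.Str.lstrip line) "ImageIndexLocal2Global:"
        · simp only [hI, if_true]
          have hguard : 0 ≤ ((bs₀ ++ [b]).length : Int) - 1 ∧
              ((bs₀ ++ [b]).length : Int) - 1 < (((bs₀ ++ [b]).map pvBlockValue).length : Int) := by
            simp
          rw [if_pos hguard]
          have ht : (((bs₀ ++ [b]).length : Int) - 1).toNat = bs₀.length := by simp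
          have hb : pvBlockValue (b ++ [line]) = pvSplitVal (PySem.Str.lstrip line) := by
            simp only [pvBlockValue, List.foldl_append, List.foldl_cons, List.foldl_nil,
              pvBlockStep]
            rw [if_pos hI]
          have hset : ((bs₀ ++ [b]).map pvBlockValue).set
                (((bs₀ ++ [b]).length : Int) - 1).toNat (pvSplitVal (PySem.Str.lstrip line))
              = (bs₀ ++ [b ++ [line]]).map pvBlockValue := by
            rw [ht]
            simp [List.map_append, hb]
          rw [hset]
          have := ih (bs₀ ++ [b ++ [line]])
          simpa using this
        · simp only [hI]
          have hval : pvBlockValue (b ++ [line]) = pvBlockValue b := by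
            simp only [pvBlockValue, List.foldl_append, List.foldl_cons, List.foldl_nil,
              pvBlockStep]
            rw [if_neg hI]
          have := ih (bs₀ ++ [b ++ [line]])
          simp only [List.map_append, List.map_cons, List.map_nil, hval,
            List.length_append] at this ⊢
          simpa using this

-- ===== VERDICT (by name: the statement is the Claim_ definition above) =====
theorem extract_node_mappings_py_spec : Claim_equal_extract_node_mappings_py := by
  intro raw_text _
  show extract_node_mappings_py raw_text = extract_node_mappings_py_alt raw_text
  unfold extract_node_mappings_py extract_node_mappings_py_alt
  simpa using pvMain (PySem.Str.splitlines raw_text) []
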